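-- pv_equiv track=rewrite | github.com/rrti/aoc | 2017/day00.py | exec_move_list
-- ===== SOURCE A (Python) =====
-- def exec_move_list(move_list, move_dirs):
-- 	points = []
--
-- 	xpos = 0
-- 	ypos = 0
--
-- 	for move in move_list:
-- 		if (move in move_dirs):
-- 			xpos += move_dirs[move][0]
-- 			ypos += move_dirs[move][1]
-- 		else:
-- 			points.append((xpos, ypos))
--
-- 	return points
-- ===== SOURCE B (Python) =====
-- def exec_move_list(move_list, move_dirs):
--     # three passes: delta sequence, componentwise running sums, then select marker indices
--     deltas = [move_dirs.get(m, (0, 0)) for m in move_list]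
--     cum = []
--     x = 0
--     y = 0
--     for dx, dy in deltas:
--         x += dx
--         y += dy
--         cum.append((x, y))
--     return [cum[i] for i, m in enumerate(move_list) if m not in move_dirs]
-- ===== Notes on version B (the rewrite author's own statement) =====
-- stated objective: alternative
-- what changed: Replaces A's single interleaved loop (mutable position plus conditional append) by three separate passes: map each element to its delta (markers get (0,0)), a prefix-sum pass producing the running position per index, and a comprehension selecting the cumulative position at each marker index.
import Mathlib
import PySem

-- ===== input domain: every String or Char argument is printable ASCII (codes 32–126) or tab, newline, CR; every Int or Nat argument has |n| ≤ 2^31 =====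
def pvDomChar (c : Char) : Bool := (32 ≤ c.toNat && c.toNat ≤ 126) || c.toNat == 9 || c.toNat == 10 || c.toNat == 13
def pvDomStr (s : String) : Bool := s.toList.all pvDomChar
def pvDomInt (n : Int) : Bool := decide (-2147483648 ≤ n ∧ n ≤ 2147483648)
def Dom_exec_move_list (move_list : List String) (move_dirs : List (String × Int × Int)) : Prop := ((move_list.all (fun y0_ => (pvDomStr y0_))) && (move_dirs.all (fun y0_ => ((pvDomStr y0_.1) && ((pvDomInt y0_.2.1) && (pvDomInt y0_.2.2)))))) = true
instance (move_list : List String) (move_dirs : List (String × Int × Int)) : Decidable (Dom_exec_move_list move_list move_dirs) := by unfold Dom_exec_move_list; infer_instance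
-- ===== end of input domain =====

-- B re-implements exec_move_list as three passes (delta map, componentwise prefix sums, marker selection) instead of A's one interleaved loop; objective: alternative decomposition, same cost.


-- ===== PORT A =====
-- shared dict primitive: first-match lookup in the association list (Python dict lookup / `in`)
def pvLookup (move_dirs : List (String × Int × Int)) (k : String) : Option (Int × Int) :=
  match move_dirs with
  | [] => none
  | (s, v) :: rest => if s == k then some v else pvLookup rest k

-- A: one interleaved loop over move_list carrying (points, xpos, ypos)
def exec_move_list (move_list : List String) (move_dirs : List (String × Int × Int)) : List (Int × Int) :=
  (move_list.foldl
    (fun (st : List (Int × Int) × Int × Int) move =>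
      match pvLookup move_dirs move with
      | some d => (st.1, st.2.1 + d.1, st.2.2 + d.2)
      | none => (st.1 ++ [(st.2.1, st.2.2)], st.2.1, st.2.2))
    ([], 0, 0)).1

-- ===== PORT B =====
-- B: delta sequence, then running cumulative positions, then select marker indices
def pvCum (x y : Int) (deltas : List (Int × Int)) : List (Int × Int) :=
  match deltas with
  | [] => []
  | d :: rest => (x + d.1, y + d.2) :: pvCum (x + d.1) (y + d.2) rest

def exec_move_list_alt (move_list : List String) (move_dirs : List (String × Int × Int)) : List (Int × Int) :=
  let deltas := move_list.map (fun m => (pvLookup move_dirs m).getD (0, 0))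
  let cum := pvCum 0 0 deltas
  (move_list.zip cum).filterMap
    (fun p => if (pvLookup move_dirs p.1).isSome then none else some p.2)

-- ===== PRECONDITION & SPEC =====
def Spec_exec_move_list (move_list : List String) (move_dirs : List (String × Int × Int)) (out : List (Int × Int)) : Prop := out = exec_move_list_alt move_list move_dirs
instance (move_list : List String) (move_dirs : List (String × Int × Int)) (out : List (Int × Int)) : Decidable (Spec_exec_move_list move_list move_dirs out) := by unfold Spec_exec_move_list; infer_instance

-- ===== CLAIM (what is proved, stated in full; the proofs are below) =====
def Claim_equal_exec_move_list : Prop := ∀ (move_list : List String) (move_dirs : List (String × Int × Int)), Dom_exec_move_list move_list move_dirs → Spec_exec_move_list move_list move_dirs (exec_move_list move_list move_dirs)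

-- ===== LEMMAS AND PROOFS =====

-- ===== VERDICT (by name: the statement is the Claim_ definition above) =====
-- B's core after consuming a prefix, starting from position (x, y)
def pvCore (move_list : List String) (move_dirs : List (String × Int × Int)) (x y : Int) : List (Int × Int) :=
  (move_list.zip (pvCum x y (move_list.map (fun m => (pvLookup move_dirs m).getD (0, 0))))).filterMap
    (fun p => if (pvLookup move_dirs p.1).isSome then none else some p.2)

theorem pvFold_eq_core (move_list : List String) (move_dirs : List (String × Int × Int)) :
    ∀ (pts : List (Int × Int)) (x y : Int),
      (move_list.foldl
        (fun (st : List (Int × Int) × Int × Int) move =>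
          match pvLookup move_dirs move with
          | some d => (st.1, st.2.1 + d.1, st.2.2 + d.2)
          | none => (st.1 ++ [(st.2.1, st.2.2)], st.2.1, st.2.2))
        (pts, x, y)).1 = pts ++ pvCore move_list move_dirs x y := by
  induction move_list with
  | nil => intro pts x y; simp [pvCore, pvCum]
  | cons m ms ih =>
    intro pts x y
    cases h : pvLookup move_dirs m with
    | some d =>
      simp only [List.foldl_cons, List.map_cons, pvCore, pvCum, List.zip_cons_cons,
        List.filterMap_cons, h, Option.getD_some, Option.isSome_some, reduceIte]
      exact ih pts (x + d.1) (y + d.2)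
    | none =>
      simp only [List.foldl_cons, h, List.map_cons, pvCore, pvCum, List.zip_cons_cons,
        List.filterMap_cons, Option.getD_none, Option.isSome_none]
      rw [ih (pts ++ [(x, y)]) x y]
      simp [pvCore]

theorem exec_move_list_spec : Claim_equal_exec_move_list := by
  intro move_list move_dirs _
  unfold Spec_exec_move_list exec_move_list exec_move_list_alt
  rw [pvFold_eq_core]
  simp [pvCore]
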